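-- pv_equiv track=rewrite | github.com/Bafodelitio/Thesis-Binning | util.py | get_kmer_to_id
-- ===== SOURCE A (Python) =====
-- import itertools
--
-- def get_kmer_to_id(kmer, combine_revcomp=False):
--     kmer_to_ids = {}
--     BASE_COMPLEMENT = {"A": "T", "T": "A", "G": "C", "C": "G"}
--     all_kmers = itertools.product("ACGT", repeat=kmer)
--     all_kmers = ["".join(k) for k in all_kmers]
--     new_id = 0
--     for kmer in all_kmers:
--         if kmer not in kmer_to_ids:
--             kmer_to_ids[kmer] = new_id
--             if combine_revcomp:
--                 rev_compl = "".join(tuple([BASE_COMPLEMENT[x] for x in reversed(kmer)]))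
--                 kmer_to_ids[rev_compl] = new_id
--             new_id += 1
--     return kmer_to_ids, new_id
-- ===== SOURCE B (Python) =====
-- import itertools
--
-- _COMP = str.maketrans("ACGT", "TGCA")
--
-- def _revcomp(s):
--     return s.translate(_COMP)[::-1]
--
-- def get_kmer_to_id(kmer, combine_revcomp=False):
--     # Staged pipeline instead of a stateful seen-dict pass: generate the kmers,
--     # and when combining, first select the canonical representatives
--     # (s <= revcomp(s); valid because product order is lexicographic), then
--     # build the whole mapping in one comprehension over the enumerated leaders.
--     kmers = ["".join(p) for p in itertools.product("ACGT", repeat=kmer)]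
--     if not combine_revcomp:
--         return dict(zip(kmers, itertools.count())), len(kmers)
--     leaders = [s for s in kmers if s <= _revcomp(s)]
--     mapping = dict(kv for i, s in enumerate(leaders) for kv in ((s, i), (_revcomp(s), i)))
--     return mapping, len(leaders)
-- ===== Notes on version B (the rewrite author's own statement) =====
-- stated objective: alternative
-- what changed: B replaces A's single stateful pass with a seen-dict and counter by a staged pipeline: generate the kmers, select canonical leaders with the stateless test s <= revcomp(s) (valid because product order is lexicographic), then build the whole mapping in one comprehension over the enumerated leaders; without combining it is just dict(zip(kmers, count())).
import Mathlib
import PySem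

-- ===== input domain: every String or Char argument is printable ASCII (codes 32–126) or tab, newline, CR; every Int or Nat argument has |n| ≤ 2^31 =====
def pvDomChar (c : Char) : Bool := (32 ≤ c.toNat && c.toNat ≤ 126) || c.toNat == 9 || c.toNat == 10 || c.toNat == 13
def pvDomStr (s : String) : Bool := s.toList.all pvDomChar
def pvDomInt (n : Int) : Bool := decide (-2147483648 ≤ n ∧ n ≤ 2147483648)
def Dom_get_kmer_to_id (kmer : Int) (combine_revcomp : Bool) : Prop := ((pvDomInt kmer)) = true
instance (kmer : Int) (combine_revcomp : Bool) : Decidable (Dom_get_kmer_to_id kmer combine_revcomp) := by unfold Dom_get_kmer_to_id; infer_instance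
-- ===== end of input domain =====

-- B replaces A's single stateful pass (seen-dict + counter) by a staged pipeline: select the
-- canonical leaders with the stateless test s <= revcomp(s), then build the whole mapping in
-- one comprehension over the enumerated leaders (alternative decomposition, same cost).

-- ===== PORT A =====
-- BASE_COMPLEMENT[x]: keys are exactly "A","T","G","C"; kmers contain only those chars,
-- so the KeyError branch is unreachable (the final else is never taken on reached inputs).
def pvComp (c : Char) : Char :=
  if c = 'A' then 'T' else if c = 'T' then 'A' else if c = 'G' then 'C'
  else if c = 'C' then 'G' else c

-- itertools.product("ACGT", repeat=n): start from [()], each round appends one base on the right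
def pvProd : Nat → List (List Char)
  | 0 => [[]]
  | n + 1 => (pvProd n).flatMap (fun t => ['A', 'C', 'G', 'T'].map (fun c => t ++ [c]))

def pvStepA (combine : Bool) (st : PySem.Dict String Int × Int) (k : String) :
    PySem.Dict String Int × Int :=
  if (st.1.get? k).isNone then
    let d := st.1.insert k st.2
    let d := if combine then d.insert (String.ofList (k.toList.reverse.map pvComp)) st.2 else d
    (d, st.2 + 1)
  else st

def get_kmer_to_id (kmer : Int) (combine_revcomp : Bool) : (List (String × Int)) × Int :=
  let allKmers : List String := (pvProd kmer.toNat).map String.ofList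
  let r := allKmers.foldl (pvStepA combine_revcomp) (PySem.Dict.empty, 0)
  (r.1.items, r.2)

-- ===== PORT B =====
-- str.maketrans("ACGT", "TGCA") translation table
def pvCompB (c : Char) : Char :=
  if c = 'A' then 'T' else if c = 'C' then 'G' else if c = 'G' then 'C'
  else if c = 'T' then 'A' else c

-- _revcomp(s) = s.translate(_COMP)[::-1]
def pvRevComp (s : String) : String := String.ofList ((s.toList.map pvCompB).reverse)

-- itertools.product("ACGT", repeat=n), as in Source B's comprehension
def pvProdB : Nat → List (List Char)
  | 0 => [[]]
  | n + 1 => (pvProdB n).flatMap (fun t => ['A', 'C', 'G', 'T'].map (fun c => t ++ [c]))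

def get_kmer_to_id_alt (kmer : Int) (combine_revcomp : Bool) : (List (String × Int)) × Int :=
  let kmers : List String := (pvProdB kmer.toNat).map String.ofList
  if combine_revcomp = false then
    -- dict(zip(kmers, itertools.count())): each kmer paired with its position
    let d := (kmers.zipIdx).foldl (fun d si => d.insert si.1 (si.2 : Int)) PySem.Dict.empty
    (d.items, (kmers.length : Int))
  else
    -- leaders = [s for s in kmers if s <= _revcomp(s)]  (Python str <= is Lean's ≤ on String)
    let leaders := kmers.filter (fun s => decide (s ≤ pvRevComp s))
    -- dict(kv for i, s in enumerate(leaders) for kv in ((s, i), (_revcomp(s), i)))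
    let pairs := (leaders.zipIdx).flatMap
      (fun si => [(si.1, (si.2 : Int)), (pvRevComp si.1, (si.2 : Int))])
    let d := pairs.foldl (fun d kv => d.insert kv.1 kv.2) PySem.Dict.empty
    (d.items, (leaders.length : Int))

-- ===== PRECONDITION & SPEC =====
-- Python A raises (ValueError from itertools.product) exactly when kmer < 0.
def Pre_get_kmer_to_id (kmer : Int) (combine_revcomp : Bool) : Prop := 0 ≤ kmer
instance (kmer : Int) (combine_revcomp : Bool) : Decidable (Pre_get_kmer_to_id kmer combine_revcomp) := by unfold Pre_get_kmer_to_id; infer_instance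
def pvWitness_get_kmer_to_id : Int × Bool := (2, true)

def Spec_get_kmer_to_id (kmer : Int) (combine_revcomp : Bool) (out : (List (String × Int)) × Int) : Prop := out = get_kmer_to_id_alt kmer combine_revcomp
instance (kmer : Int) (combine_revcomp : Bool) (out : (List (String × Int)) × Int) : Decidable (Spec_get_kmer_to_id kmer combine_revcomp out) := by unfold Spec_get_kmer_to_id; infer_instance

-- ===== CLAIM (what is proved, stated in full; the proofs are below) =====
def Claim_equal_get_kmer_to_id : Prop := ∀ (kmer : Int) (combine_revcomp : Bool), Dom_get_kmer_to_id kmer combine_revcomp → Pre_get_kmer_to_id kmer combine_revcomp → Spec_get_kmer_to_id kmer combine_revcomp (get_kmer_to_id kmer combine_revcomp)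

-- ===== LEMMAS AND PROOFS =====

-- proof-side vocabulary: base-4 digits of an index (least-significant first), the value of a
-- most-significant-first digit list, the kmer chars/key of an index, the reverse complement
def pvBase (d : Nat) : Char := ['A', 'C', 'G', 'T'].getD d 'A'
def pvDigitsRev : Nat → Nat → List Nat
  | 0, _ => []
  | n + 1, x => (x % 4) :: pvDigitsRev n (x / 4)
def pvVal (ds : List Nat) : Nat := ds.foldl (fun a d => a * 4 + d) 0
def pvChars (n i : Nat) : List Char := ((pvDigitsRev n i).reverse).map pvBase
def pvKey (n i : Nat) : String := String.ofList (pvChars n i)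
def pvRcIdx (n i : Nat) : Nat := pvVal ((pvDigitsRev n i).map (fun d => 3 - d))

-- the canonical per-leader step both sides are reduced to
def pvStepL (combine : Bool) (n : Nat) (st : PySem.Dict String Int × Int) (i : Nat) :
    PySem.Dict String Int × Int :=
  ((if combine then (st.1.insert (pvKey n i) st.2).insert (pvKey n (pvRcIdx n i)) st.2
    else st.1.insert (pvKey n i) st.2), st.2 + 1)

theorem pvDigitsRev_length (n i : Nat) : (pvDigitsRev n i).length = n := by
  induction n generalizing i with
  | zero => rfl
  | succ n ih => simp [pvDigitsRev, ih]

theorem pvDigitsRev_lt (n i : Nat) : ∀ d ∈ pvDigitsRev n i, d < 4 := by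
  induction n generalizing i with
  | zero => simp [pvDigitsRev]
  | succ n ih =>
      intro d hd
      simp only [pvDigitsRev, List.mem_cons] at hd
      rcases hd with h | h
      · omega
      · exact ih _ d h

theorem pvVal_append (ds : List Nat) (d : Nat) : pvVal (ds ++ [d]) = 4 * pvVal ds + d := by
  simp [pvVal, List.foldl_append]; omega

theorem pvVal_foldl (ds : List Nat) : ∀ a : Nat,
    ds.foldl (fun a d => a * 4 + d) a = a * 4 ^ ds.length + pvVal ds := by
  induction ds with
  | nil => intro a; simp [pvVal]
  | cons d ds ih =>
      intro a
      have h0 : pvVal (d :: ds) = ds.foldl (fun a d => a * 4 + d) (0 * 4 + d) := rfl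
      rw [List.foldl_cons, ih (a * 4 + d), h0, ih (0 * 4 + d)]
      simp only [List.length_cons, pow_succ]
      ring

theorem pvVal_cons (d : Nat) (ds : List Nat) :
    pvVal (d :: ds) = d * 4 ^ ds.length + pvVal ds := by
  have h0 : pvVal (d :: ds) = ds.foldl (fun a d => a * 4 + d) (0 * 4 + d) := rfl
  rw [h0, pvVal_foldl]
  ring_nf

theorem pvVal_lt (ds : List Nat) (h : ∀ d ∈ ds, d < 4) : pvVal ds < 4 ^ ds.length := by
  induction ds using List.reverseRecOn with
  | nil => simp [pvVal]
  | append_singleton ds d ih =>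
      have hd : d < 4 := h d (by simp)
      have hds := ih (fun e he => h e (by simp [he]))
      rw [pvVal_append]
      simp only [List.length_append, List.length_singleton]
      calc 4 * pvVal ds + d < 4 * pvVal ds + 4 := by omega
        _ ≤ 4 * 4 ^ ds.length := by omega
        _ = 4 ^ (ds.length + 1) := by ring

theorem pvDigitsRev_pvVal (ds : List Nat) (h : ∀ d ∈ ds, d < 4) :
    pvDigitsRev ds.length (pvVal ds) = ds.reverse := by
  induction ds using List.reverseRecOn with
  | nil => simp [pvDigitsRev, pvVal]
  | append_singleton ds d ih =>
      have hd : d < 4 := h d (by simp)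
      have ih' := ih (fun e he => h e (by simp [he]))
      rw [pvVal_append]
      simp only [List.length_append, List.length_singleton, List.reverse_append,
        List.reverse_singleton, List.singleton_append]
      show pvDigitsRev (ds.length + 1) (4 * pvVal ds + d) = d :: ds.reverse
      have h1 : (4 * pvVal ds + d) % 4 = d := by omega
      have h2 : (4 * pvVal ds + d) / 4 = pvVal ds := by omega
      simp [pvDigitsRev, h1, h2, ih']

theorem pvVal_pvDigitsRev (n i : Nat) (h : i < 4 ^ n) :
    pvVal ((pvDigitsRev n i).reverse) = i := by
  induction n generalizing i with
  | zero => simp [pvDigitsRev, pvVal]; omega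
  | succ n ih =>
      have hdiv : i / 4 < 4 ^ n := by
        rw [pow_succ] at h; omega
      simp only [pvDigitsRev, List.reverse_cons]
      rw [pvVal_append, ih _ hdiv]
      omega

theorem pvDigitsRev_inj (n i i' : Nat) (hi : i < 4 ^ n) (hi' : i' < 4 ^ n)
    (h : pvDigitsRev n i = pvDigitsRev n i') : i = i' := by
  have h2 := pvVal_pvDigitsRev n i hi
  rw [h, pvVal_pvDigitsRev n i' hi'] at h2
  omega

theorem pvRcIdx_lt (n i : Nat) : pvRcIdx n i < 4 ^ n := by
  have h := pvVal_lt ((pvDigitsRev n i).map (fun d => 3 - d)) (by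
    intro d hd
    simp only [List.mem_map] at hd
    obtain ⟨e, _, he⟩ := hd
    omega)
  simpa [pvRcIdx, pvDigitsRev_length] using h

theorem pvDigitsRev_rcIdx (n i : Nat) :
    pvDigitsRev n (pvRcIdx n i) = ((pvDigitsRev n i).map (fun d => 3 - d)).reverse := by
  have h := pvDigitsRev_pvVal ((pvDigitsRev n i).map (fun d => 3 - d)) (by
    intro d hd
    simp only [List.mem_map] at hd
    obtain ⟨e, _, he⟩ := hd
    omega)
  simpa [pvRcIdx, pvDigitsRev_length] using h

theorem pvRcIdx_invol (n i : Nat) (h : i < 4 ^ n) : pvRcIdx n (pvRcIdx n i) = i := by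
  have e1 : pvRcIdx n (pvRcIdx n i)
      = pvVal ((pvDigitsRev n (pvRcIdx n i)).map (fun d => 3 - d)) := rfl
  rw [e1, pvDigitsRev_rcIdx, List.map_reverse, List.map_map]
  have e2 : ((pvDigitsRev n i).map ((fun d => 3 - d) ∘ (fun d : Nat => 3 - d)))
      = (pvDigitsRev n i).map id := by
    apply List.map_congr_left
    intro d hd
    have := pvDigitsRev_lt n i d hd
    simp only [Function.comp_apply, id_eq]
    omega
  rw [e2, List.map_id]
  exact pvVal_pvDigitsRev n i h

theorem pvBase_inj (d e : Nat) (hd : d < 4) (he : e < 4) (h : pvBase d = pvBase e) : d = e := by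
  interval_cases d <;> interval_cases e <;> simp_all [pvBase]

theorem pvBase_lt_iff (d e : Nat) (hd : d < 4) (he : e < 4) : (pvBase d < pvBase e ↔ d < e) := by
  interval_cases d <;> interval_cases e <;> simp [pvBase]

theorem pvMapBase_inj (xs : List Nat) : ∀ (ys : List Nat), (∀ d ∈ xs, d < 4) →
    (∀ d ∈ ys, d < 4) → xs.map pvBase = ys.map pvBase → xs = ys := by
  induction xs with
  | nil => intro ys _ _ h; cases ys <;> simp_all
  | cons a xs ih =>
      intro ys hx hy h
      cases ys with
      | nil => simp_all
      | cons b ys =>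
          simp only [List.map_cons, List.cons.injEq] at h
          have hab : a = b := pvBase_inj a b (hx a (by simp)) (hy b (by simp)) h.1
          have ht := ih ys (fun d hd => hx d (by simp [hd])) (fun d hd => hy d (by simp [hd])) h.2
          simp [hab, ht]

theorem pvKey_inj (n i i' : Nat) (hi : i < 4 ^ n) (hi' : i' < 4 ^ n)
    (h : pvKey n i = pvKey n i') : i = i' := by
  apply pvDigitsRev_inj n i i' hi hi'
  have hl : pvChars n i = pvChars n i' := by
    have h2 := congrArg String.toList h
    simpa [pvKey] using h2
  have h3 : (pvDigitsRev n i).reverse = (pvDigitsRev n i').reverse := by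
    apply pvMapBase_inj
    · intro d hd; exact pvDigitsRev_lt n i d (List.mem_reverse.mp hd)
    · intro d hd; exact pvDigitsRev_lt n i' d (List.mem_reverse.mp hd)
    · exact hl
  simpa using h3

-- lexicographic order on mapped digit lists IS numeric order of their values
theorem pvLex_iff : ∀ (ds es : List Nat), ds.length = es.length → (∀ d ∈ ds, d < 4) →
    (∀ e ∈ es, e < 4) →
    (List.Lex (· < ·) (ds.map pvBase) (es.map pvBase) ↔ pvVal ds < pvVal es) := by
  intro ds
  induction ds with
  | nil =>
      intro es hlen _ _
      have : es = [] := List.eq_nil_of_length_eq_zero hlen.symm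
      subst this
      constructor
      · intro h; cases h
      · intro h; simp [pvVal] at h
  | cons d ds ih =>
      intro es hlen hd he
      cases es with
      | nil => simp at hlen
      | cons e es =>
          have hlen' : ds.length = es.length := by simpa using hlen
          have hd4 : d < 4 := hd d (by simp)
          have he4 : e < 4 := he e (by simp)
          have hd' : ∀ x ∈ ds, x < 4 := fun x hx => hd x (by simp [hx])
          have he' : ∀ x ∈ es, x < 4 := fun x hx => he x (by simp [hx])
          have hXd : pvVal ds < 4 ^ ds.length := pvVal_lt ds hd'
          have hXe : pvVal es < 4 ^ es.length := pvVal_lt es he'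
          rw [pvVal_cons, pvVal_cons, ← hlen']
          rcases Nat.lt_trichotomy d e with hde | hde | hde
          · constructor
            · intro _
              have h1 : (d + 1) * 4 ^ ds.length ≤ e * 4 ^ ds.length :=
                Nat.mul_le_mul_right _ (by omega)
              have h2 : (d + 1) * 4 ^ ds.length = d * 4 ^ ds.length + 4 ^ ds.length := by ring
              omega
            · intro _
              exact List.Lex.rel ((pvBase_lt_iff d e hd4 he4).mpr hde)
          · subst hde
            simp only [List.map_cons]
            rw [List.lex_cons_iff]
            rw [ih es hlen' hd' he']
            omega
          · constructor
            · intro h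
              exfalso
              have hx : pvBase e < pvBase d := (pvBase_lt_iff e d he4 hd4).mpr hde
              simp only [List.map_cons] at h
              generalize hgd : pvBase d = x at h hx
              generalize hge : pvBase e = y at h hx
              cases h with
              | rel h1 => exact absurd hx (lt_asymm h1)
              | cons h1 => exact lt_irrefl _ hx
            · intro h
              exfalso
              have h1 : (e + 1) * 4 ^ ds.length ≤ d * 4 ^ ds.length :=
                Nat.mul_le_mul_right _ (by omega)
              have h2 : (e + 1) * 4 ^ ds.length = e * 4 ^ ds.length + 4 ^ ds.length := by ring
              rw [← hlen'] at hXe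
              omega

theorem pvKey_lt_iff (n i j : Nat) (hi : i < 4 ^ n) (hj : j < 4 ^ n) :
    (pvKey n i < pvKey n j ↔ i < j) := by
  have h0 : (pvKey n i < pvKey n j) ↔ ((pvKey n i).toList < (pvKey n j).toList) :=
    String.lt_iff_toList_lt
  have h3 : ((pvKey n i).toList < (pvKey n j).toList)
      ↔ List.Lex (· < ·) ((pvDigitsRev n i).reverse.map pvBase)
          ((pvDigitsRev n j).reverse.map pvBase) := by
    have e1 : (pvKey n i).toList = (pvDigitsRev n i).reverse.map pvBase := by
      simp [pvKey, pvChars]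
    have e2 : (pvKey n j).toList = (pvDigitsRev n j).reverse.map pvBase := by
      simp [pvKey, pvChars]
    rw [e1, e2]
    exact List.lt_iff_lex_lt _ _
  rw [h0, h3, pvLex_iff _ _ (by simp [pvDigitsRev_length])
    (fun d hd => pvDigitsRev_lt n i d (List.mem_reverse.mp hd))
    (fun d hd => pvDigitsRev_lt n j d (List.mem_reverse.mp hd)),
    pvVal_pvDigitsRev n i hi, pvVal_pvDigitsRev n j hj]

theorem pvKey_le_iff (n i j : Nat) (hi : i < 4 ^ n) (hj : j < 4 ^ n) :
    (pvKey n i ≤ pvKey n j ↔ i ≤ j) := by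
  rw [← not_lt, ← Nat.not_lt]
  exact not_congr (pvKey_lt_iff n j i hj hi)

-- the reverse-complement key A builds from the kmer string is the key of index pvRcIdx n i
theorem pvRevComp_key (n i : Nat) :
    String.ofList ((pvKey n i).toList.reverse.map pvComp) = pvKey n (pvRcIdx n i) := by
  unfold pvKey pvChars
  rw [pvDigitsRev_rcIdx]
  congr 1
  simp only [String.toList_ofList, List.map_reverse, List.reverse_reverse, List.map_map]
  apply List.map_congr_left
  intro d hd
  have := pvDigitsRev_lt n i d hd
  simp only [Function.comp_apply]
  interval_cases d <;> simp [pvBase, pvComp]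

theorem pvRevComp_key' (n i : Nat) :
    String.ofList ((List.map pvComp (pvKey n i).toList).reverse) = pvKey n (pvRcIdx n i) := by
  rw [← pvRevComp_key]
  congr 1
  rw [List.map_reverse]

-- the reverse-complement string B builds is the key of index pvRcIdx n i
theorem pvRevComp_pvKey (n i : Nat) : pvRevComp (pvKey n i) = pvKey n (pvRcIdx n i) := by
  unfold pvRevComp pvKey pvChars
  rw [pvDigitsRev_rcIdx]
  congr 1
  simp only [String.toList_ofList, List.map_reverse, List.reverse_reverse, List.map_map]
  apply List.map_congr_left
  intro d hd
  have := pvDigitsRev_lt n i d hd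
  simp only [Function.comp_apply]
  interval_cases d <;> simp [pvBase, pvCompB]

-- range (4*m) splits into blocks of four
theorem pvRange_mul_four (m : Nat) :
    List.range (4 * m)
      = (List.range m).flatMap (fun q => [4 * q, 4 * q + 1, 4 * q + 2, 4 * q + 3]) := by
  induction m with
  | zero => rfl
  | succ m ih =>
      have h4 : 4 * (m + 1) = (4 * m) + 1 + 1 + 1 + 1 := by ring
      rw [h4]
      simp [List.range_succ, List.flatMap_append, ih]

theorem pvChars_block (n q r : Nat) (hr : r < 4) :
    pvChars (n + 1) (4 * q + r) = pvChars n q ++ [pvBase r] := by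
  have h1 : (4 * q + r) % 4 = r := by omega
  have h2 : (4 * q + r) / 4 = q := by omega
  simp [pvChars, pvDigitsRev, h1, h2]

-- itertools.product order IS base-4 index order (A's generator)
theorem pvProd_eq (n : Nat) : pvProd n = (List.range (4 ^ n)).map (pvChars n) := by
  induction n with
  | zero => rfl
  | succ n ih =>
      rw [pvProd, ih, pow_succ, mul_comm (4 ^ n) 4, pvRange_mul_four,
        List.flatMap_map, List.map_flatMap]
      apply congrArg (fun f => List.flatMap f (List.range (4 ^ n)))
      funext q
      have e0 : pvChars (n + 1) (4 * q) = pvChars n q ++ ['A'] := by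
        simpa [pvBase] using pvChars_block n q 0 (by omega)
      have e1 : pvChars (n + 1) (4 * q + 1) = pvChars n q ++ ['C'] := by
        simpa [pvBase] using pvChars_block n q 1 (by omega)
      have e2 : pvChars (n + 1) (4 * q + 2) = pvChars n q ++ ['G'] := by
        simpa [pvBase] using pvChars_block n q 2 (by omega)
      have e3 : pvChars (n + 1) (4 * q + 3) = pvChars n q ++ ['T'] := by
        simpa [pvBase] using pvChars_block n q 3 (by omega)
      simp [e0, e1, e2, e3]

-- B's generator is the same product, in the same order
theorem pvProdB_eq (n : Nat) : pvProdB n = (List.range (4 ^ n)).map (pvChars n) := by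
  induction n with
  | zero => rfl
  | succ n ih =>
      rw [pvProdB, ih, pow_succ, mul_comm (4 ^ n) 4, pvRange_mul_four,
        List.flatMap_map, List.map_flatMap]
      apply congrArg (fun f => List.flatMap f (List.range (4 ^ n)))
      funext q
      have e0 : pvChars (n + 1) (4 * q) = pvChars n q ++ ['A'] := by
        simpa [pvBase] using pvChars_block n q 0 (by omega)
      have e1 : pvChars (n + 1) (4 * q + 1) = pvChars n q ++ ['C'] := by
        simpa [pvBase] using pvChars_block n q 1 (by omega)
      have e2 : pvChars (n + 1) (4 * q + 2) = pvChars n q ++ ['G'] := by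
        simpa [pvBase] using pvChars_block n q 2 (by omega)
      have e3 : pvChars (n + 1) (4 * q + 3) = pvChars n q ++ ['T'] := by
        simpa [pvBase] using pvChars_block n q 3 (by omega)
      simp [e0, e1, e2, e3]

-- invariant: after processing indices < i, the dict contains exactly the processed kmers
-- together with (when combining) their reverse complements
def pvInv (n : Nat) (combine : Bool) (i : Nat) (d : PySem.Dict String Int) : Prop :=
  ∀ j, j < 4 ^ n →
    ((d.get? (pvKey n j)).isSome = true ↔ (j < i ∨ (combine = true ∧ pvRcIdx n j < i)))

theorem pvInv_skip (n i : Nat) (d : PySem.Dict String Int) (hi : i < 4 ^ n)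
    (hlt : pvRcIdx n i < i) (hinv : pvInv n true i d) : pvInv n true (i + 1) d := by
  intro j hj
  rw [hinv j hj]
  simp only [true_and]
  constructor
  · intro h; omega
  · intro h
    by_cases hji : j = i
    · right; rw [hji]; exact hlt
    · by_cases hrcj : pvRcIdx n j = i
      · left
        have : j = pvRcIdx n i := by
          rw [← hrcj, pvRcIdx_invol n j hj]
        omega
      · omega

theorem pvInv_insert_noc (n i : Nat) (d : PySem.Dict String Int) (v : Int) (hi : i < 4 ^ n)
    (hinv : pvInv n false i d) : pvInv n false (i + 1) (d.insert (pvKey n i) v) := by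
  intro j hj
  rw [PySem.Dict.get?_insert]
  by_cases he : pvKey n j = pvKey n i
  · have hji : j = i := pvKey_inj n j i hj hi he
    simp [hji]
  · have hji : j ≠ i := fun h => he (by rw [h])
    rw [if_neg he, hinv j hj]
    simp only [Bool.false_eq_true, false_and, or_false]
    omega

theorem pvInv_insert_c (n i : Nat) (d : PySem.Dict String Int) (v w : Int) (hi : i < 4 ^ n)
    (hinv : pvInv n true i d) :
    pvInv n true (i + 1) ((d.insert (pvKey n i) v).insert (pvKey n (pvRcIdx n i)) w) := by
  intro j hj
  have hrc4 : pvRcIdx n i < 4 ^ n := pvRcIdx_lt n i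
  rw [PySem.Dict.get?_insert]
  by_cases h1 : pvKey n j = pvKey n (pvRcIdx n i)
  · have hj1 : j = pvRcIdx n i := pvKey_inj n j (pvRcIdx n i) hj hrc4 h1
    have hrcj : pvRcIdx n j = i := by rw [hj1]; exact pvRcIdx_invol n i hi
    rw [if_pos h1]
    simp only [Option.isSome_some, true_iff]
    exact Or.inr ⟨by trivial, by omega⟩
  · rw [if_neg h1, PySem.Dict.get?_insert]
    by_cases h2 : pvKey n j = pvKey n i
    · have hj2 : j = i := pvKey_inj n j i hj hi h2
      rw [if_pos h2]
      simp only [Option.isSome_some, true_iff]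
      exact Or.inl (by omega)
    · have hji : j ≠ i := fun h => h2 (by rw [h])
      have hjrc : j ≠ pvRcIdx n i := fun h => h1 (by rw [h])
      have hrcj : pvRcIdx n j ≠ i := by
        intro h
        exact hjrc (by rw [← pvRcIdx_invol n j hj, h])
      rw [if_neg h2, hinv j hj]
      simp only [true_and]
      omega

-- A's stateful pass over ALL kmers reduces to the canonical pvStepL over the LEADER indices
theorem pvMainA (n : Nat) (combine : Bool) (m : Nat) :
    ∀ (i : Nat) (d : PySem.Dict String Int) (id : Int), i + m = 4 ^ n → pvInv n combine i d →
      List.foldl (fun st q => pvStepA combine st (pvKey n q)) (d, id) (List.range' i m)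
        = List.foldl (pvStepL combine n) (d, id)
            ((List.range' i m).filter (fun q => !combine || decide (q ≤ pvRcIdx n q))) := by
  induction m with
  | zero => intro i d id _ _; rfl
  | succ m ih =>
      intro i d id hsum hinv
      have hi : i < 4 ^ n := by omega
      rw [List.range'_succ, List.foldl_cons, List.filter_cons]
      have hmem := hinv i hi
      by_cases hc : combine = true
      · subst hc
        by_cases hlt : pvRcIdx n i < i
        · -- A skips: the kmer was already inserted as an earlier reverse complement
          have hpred : (!true || decide (i ≤ pvRcIdx n i)) = false := by
            simp [Nat.not_le.mpr hlt]
          rw [hpred, if_neg (by simp)]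
          have hs : (d.get? (pvKey n i)).isSome = true := hmem.2 (Or.inr ⟨rfl, hlt⟩)
          have hA : pvStepA true (d, id) (pvKey n i) = (d, id) := by
            cases h : d.get? (pvKey n i) with
            | none => rw [h] at hs; simp at hs
            | some v => simp [pvStepA, h]
          rw [hA]
          exact ih (i + 1) d id (by omega) (pvInv_skip n i d hi hlt hinv)
        · -- leader: A inserts the kmer and its reverse complement
          have hpred : (!true || decide (i ≤ pvRcIdx n i)) = true := by
            simp; omega
          rw [hpred, if_pos rfl, List.foldl_cons]
          have hs : (d.get? (pvKey n i)).isSome ≠ true := by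
            simp only [ne_eq, hmem]; simp [hlt]
          have hA : pvStepA true (d, id) (pvKey n i)
              = ((d.insert (pvKey n i) id).insert (pvKey n (pvRcIdx n i)) id, id + 1) := by
            cases h : d.get? (pvKey n i) with
            | some v => rw [h] at hs; simp at hs
            | none => simp [pvStepA, h, pvRevComp_key']
          have hL : pvStepL true n (d, id) i
              = ((d.insert (pvKey n i) id).insert (pvKey n (pvRcIdx n i)) id, id + 1) := rfl
          rw [hA, hL]
          exact ih (i + 1) _ _ (by omega) (pvInv_insert_c n i d id id hi hinv)
      · -- combine = false: every kmer is new, only the kmer itself is inserted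
        have hcf : combine = false := by simpa using hc
        subst hcf
        have hpred : (!false || decide (i ≤ pvRcIdx n i)) = true := by simp
        rw [hpred, if_pos rfl, List.foldl_cons]
        have hs : (d.get? (pvKey n i)).isSome ≠ true := by
          simp only [ne_eq, hmem]; simp
        have hA : pvStepA false (d, id) (pvKey n i) = (d.insert (pvKey n i) id, id + 1) := by
          cases h : d.get? (pvKey n i) with
          | some v => rw [h] at hs; simp at hs
          | none => simp [pvStepA, h]
        have hL : pvStepL false n (d, id) i = (d.insert (pvKey n i) id, id + 1) := rfl
        rw [hA, hL]
        exact ih (i + 1) _ _ (by omega) (pvInv_insert_noc n i d id hi hinv)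

-- the canonical pass over indices equals B's zipIdx insert fold (no combining)
theorem pvFoldSimple (n : Nat) (L : List Nat) : ∀ (k : Nat) (d : PySem.Dict String Int),
    List.foldl (pvStepL false n) (d, (k : Int)) L
      = (((L.map (pvKey n)).zipIdx k).foldl
          (fun d si => d.insert si.1 (si.2 : Int)) d, (k : Int) + L.length) := by
  induction L with
  | nil => intro k d; simp
  | cons a L ih =>
      intro k d
      rw [List.foldl_cons, List.map_cons, List.zipIdx_cons, List.foldl_cons]
      have hL : pvStepL false n (d, (k : Int)) a = (d.insert (pvKey n a) k, (k : Int) + 1) := rfl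
      have hk : ((k : Int) + 1) = ((k + 1 : Nat) : Int) := by push_cast; ring
      rw [hL, hk, ih (k + 1) (d.insert (pvKey n a) k)]
      exact congrArg₂ Prod.mk rfl (by simp only [List.length_cons]; push_cast; ring)

-- the canonical pass over indices equals B's flatMap pair fold (combining)
theorem pvFoldPairs (n : Nat) (L : List Nat) : ∀ (k : Nat) (d : PySem.Dict String Int),
    List.foldl (pvStepL true n) (d, (k : Int)) L
      = ((((L.map (pvKey n)).zipIdx k).flatMap
            (fun si => [(si.1, (si.2 : Int)), (pvRevComp si.1, (si.2 : Int))])).foldl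
          (fun d kv => d.insert kv.1 kv.2) d, (k : Int) + L.length) := by
  induction L with
  | nil => intro k d; simp
  | cons a L ih =>
      intro k d
      rw [List.foldl_cons, List.map_cons, List.zipIdx_cons, List.flatMap_cons,
        List.foldl_append]
      have hL : pvStepL true n (d, (k : Int)) a
          = ((d.insert (pvKey n a) k).insert (pvKey n (pvRcIdx n a)) k, (k : Int) + 1) := rfl
      have hpair : List.foldl (fun d (kv : String × Int) => d.insert kv.1 kv.2) d
            [((pvKey n a), (k : Int)), (pvRevComp (pvKey n a), (k : Int))]
          = (d.insert (pvKey n a) k).insert (pvKey n (pvRcIdx n a)) k := by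
        simp [pvRevComp_pvKey]
      have hk : ((k : Int) + 1) = ((k + 1 : Nat) : Int) := by push_cast; ring
      rw [hL, hk, ih (k + 1) _, hpair]
      exact congrArg₂ Prod.mk rfl (by simp only [List.length_cons]; push_cast; ring)

-- the filtered leader strings are the keys of the filtered leader indices
theorem pvLeaders (n : Nat) :
    ((List.range (4 ^ n)).map (pvKey n)).filter (fun s => decide (s ≤ pvRevComp s))
      = ((List.range (4 ^ n)).filter (fun q => decide (q ≤ pvRcIdx n q))).map (pvKey n) := by
  rw [List.filter_map]
  congr 1
  apply List.filter_congr
  intro q hq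
  have hq4 : q < 4 ^ n := List.mem_range.mp hq
  simp only [Function.comp_apply]
  rw [pvRevComp_pvKey]
  exact decide_eq_decide.mpr (pvKey_le_iff n q (pvRcIdx n q) hq4 (pvRcIdx_lt n q))

theorem pvKmers_eq (n : Nat) : (pvProd n).map String.ofList = (List.range (4 ^ n)).map (pvKey n) := by
  rw [pvProd_eq, List.map_map]; rfl

theorem pvKmersB_eq (n : Nat) : (pvProdB n).map String.ofList = (List.range (4 ^ n)).map (pvKey n) := by
  rw [pvProdB_eq, List.map_map]; rfl

theorem pvFinal (kmer : Int) (combine : Bool) :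
    get_kmer_to_id kmer combine = get_kmer_to_id_alt kmer combine := by
  simp only [get_kmer_to_id, get_kmer_to_id_alt, pvKmers_eq, pvKmersB_eq]
  rw [List.foldl_map]
  have hinv0 : pvInv kmer.toNat combine 0 PySem.Dict.empty := by
    intro j hj; simp [pysem]
  have hmain := pvMainA kmer.toNat combine (4 ^ kmer.toNat) 0 PySem.Dict.empty 0
    (by omega) hinv0
  rw [← List.range_eq_range'] at hmain
  cases combine with
  | false =>
      rw [if_pos rfl]
      have hpred : ((List.range (4 ^ kmer.toNat)).filter
          (fun q => !false || decide (q ≤ pvRcIdx kmer.toNat q)))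
          = List.range (4 ^ kmer.toNat) := by
        apply List.filter_eq_self.mpr
        intro q _; simp
      rw [hpred] at hmain
      rw [show (0 : Int) = ((0 : Nat) : Int) from rfl,
        pvFoldSimple kmer.toNat (List.range (4 ^ kmer.toNat)) 0 PySem.Dict.empty] at hmain
      simp only [Nat.cast_zero, zero_add] at hmain
      rw [hmain]
      simp
  | true =>
      rw [if_neg (by simp)]
      have hpred : ((List.range (4 ^ kmer.toNat)).filter
          (fun q => !true || decide (q ≤ pvRcIdx kmer.toNat q)))
          = (List.range (4 ^ kmer.toNat)).filter
              (fun q => decide (q ≤ pvRcIdx kmer.toNat q)) := by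
        apply List.filter_congr
        intro q _; simp
      rw [hpred] at hmain
      rw [show (0 : Int) = ((0 : Nat) : Int) from rfl, pvFoldPairs kmer.toNat
        ((List.range (4 ^ kmer.toNat)).filter (fun q => decide (q ≤ pvRcIdx kmer.toNat q)))
        0 PySem.Dict.empty] at hmain
      simp only [Nat.cast_zero, zero_add] at hmain
      rw [pvLeaders kmer.toNat, hmain]
      simp

-- ===== VERDICT (by name: the statement is the Claim_ definition above) =====
theorem get_kmer_to_id_spec : Claim_equal_get_kmer_to_id := by
  intro kmer combine _ _
  unfold Spec_get_kmer_to_id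
  exact pvFinal kmer combine
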